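-- pv_equiv track=rewrite | github.com/Architeuthis-Flux/Temporal-Replay-26-Badge | firmware/initial_filesystem/apps/tardigotchi/matrix.py | _bar_rows
-- ===== SOURCE A (Python) =====
-- def _bar_rows(value):
--     """Return three row-bytes representing a 2-col vertical fill on the
--     right edge (cols 6..7). 0..100 maps to 0..6 lit cells, filling
--     bottom-up."""
--     cells = (int(value) * 6) // 100
--     if cells < 0:
--         cells = 0
--     if cells > 6:
--         cells = 6
--     rows = [0, 0, 0]
--     # Order: row2 col7, row2 col6, row1 col7, row1 col6, row0 col7, row0 col6.
--     # Masks are MSB-first 8-bit so col 7 = bit 0 = 0b00000001, col 6 = bit 1.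
--     pattern = (
--         (2, 0b00000001),
--         (2, 0b00000010),
--         (1, 0b00000001),
--         (1, 0b00000010),
--         (0, 0b00000001),
--         (0, 0b00000010),
--     )
--     for i in range(cells):
--         r, m = pattern[i]
--         rows[r] |= m
--     return rows
-- ===== SOURCE B (Python) =====
-- def _bar_rows(value):
--     """Same 3 row-bytes as A, computed per row from a closed-form bit count
--     instead of iterating a 6-entry pattern table."""
--     cells = (int(value) * 6) // 100
--     cells = min(max(cells, 0), 6)
--     rows = [0, 0, 0]
--     for r, off in ((2, 0), (1, 2), (0, 4)):
--         n = min(max(cells - off, 0), 2)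
--         rows[r] = (1 << n) - 1
--     return rows
-- ===== Notes on version B (the rewrite author's own statement) =====
-- stated objective: simpler
-- what changed: Replaces the six-entry (row,mask) pattern table and the per-cell OR loop by a per-row closed form: each row byte is computed directly as (1<<n)-1 where n counts that row's lit cells from the clamped total and a per-row offset.
import Mathlib
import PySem

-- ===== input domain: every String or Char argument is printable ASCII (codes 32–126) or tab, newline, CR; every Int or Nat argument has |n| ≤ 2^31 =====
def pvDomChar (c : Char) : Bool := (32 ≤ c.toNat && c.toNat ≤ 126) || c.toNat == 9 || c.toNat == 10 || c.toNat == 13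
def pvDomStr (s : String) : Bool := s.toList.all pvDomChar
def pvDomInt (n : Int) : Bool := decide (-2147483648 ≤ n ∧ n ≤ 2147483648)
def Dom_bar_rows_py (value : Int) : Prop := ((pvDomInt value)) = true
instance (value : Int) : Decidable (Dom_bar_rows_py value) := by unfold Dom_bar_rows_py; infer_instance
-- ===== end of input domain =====

-- B replaces A's 6-entry (row,mask) table and per-cell OR loop by a per-row closed form (objective: simpler).

-- ===== PORT A =====
def pvPatternA : List (Int × Int) := [(2, 1), (2, 2), (1, 1), (1, 2), (0, 1), (0, 2)]

def bar_rows_py (value : Int) : List Int :=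
  let cells := PySem.Int.floordiv (value * 6) 100
  let cells := if cells < 0 then 0 else cells
  let cells := if cells > 6 then 6 else cells
  let rows : List Int := [0, 0, 0]
  (PySem.List.pyRange 0 cells 1).foldl (fun rows i =>
    let rm := PySem.List.pyGetD pvPatternA i (0, 0)
    PySem.List.pySetD rows rm.1 (PySem.Int.bor (PySem.List.pyGetD rows rm.1 0) rm.2)) rows

-- ===== PORT B =====
def bar_rows_py_alt (value : Int) : List Int :=
  let cells := min (max (PySem.Int.floordiv (value * 6) 100) 0) 6
  let row (off : Int) : Int := (1 <<< (min (max (cells - off) 0) 2).toNat) - 1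
  [row 4, row 2, row 0]

-- ===== PRECONDITION & SPEC =====
def Spec_bar_rows_py (value : Int) (out : List Int) : Prop := out = bar_rows_py_alt value
instance (value : Int) (out : List Int) : Decidable (Spec_bar_rows_py value out) := by unfold Spec_bar_rows_py; infer_instance

-- ===== CLAIM (what is proved, stated in full; the proofs are below) =====
def Claim_equal_bar_rows_py : Prop := ∀ (value : Int), Dom_bar_rows_py value → Spec_bar_rows_py value (bar_rows_py value)

-- ===== LEMMAS AND PROOFS =====

-- A's two if-clamps equal the min/max clamp.
lemma pv_clamp_eq (c : Int) :
    (if (if c < 0 then 0 else c) > 6 then 6 else (if c < 0 then 0 else c)) = min (max c 0) 6 := by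
  split_ifs <;> omega

-- Both row computations agree for every clamped cell count 0..6.
lemma pv_cells_eq (c : Int) (h0 : 0 ≤ c) (h6 : c ≤ 6) :
    (PySem.List.pyRange 0 c 1).foldl (fun rows i =>
      PySem.List.pySetD rows (PySem.List.pyGetD pvPatternA i (0, 0)).1
        (PySem.Int.bor (PySem.List.pyGetD rows (PySem.List.pyGetD pvPatternA i (0, 0)).1 0)
          (PySem.List.pyGetD pvPatternA i (0, 0)).2))
      ([0, 0, 0] : List Int)
    = [((1 <<< (min (max (c - 4) 0) 2).toNat : Nat) : Int) - 1,
       ((1 <<< (min (max (c - 2) 0) 2).toNat : Nat) : Int) - 1,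
       ((1 <<< (min (max (c - 0) 0) 2).toNat : Nat) : Int) - 1] := by
  interval_cases c <;> decide

theorem pv_main (value : Int) : bar_rows_py value = bar_rows_py_alt value := by
  simp only [bar_rows_py, bar_rows_py_alt]
  rw [pv_clamp_eq]
  exact pv_cells_eq (min (max (PySem.Int.floordiv (value * 6) 100) 0) 6) (by omega) (by omega)

-- ===== VERDICT (by name: the statement is the Claim_ definition above) =====
theorem bar_rows_py_spec : Claim_equal_bar_rows_py := by
  intro value _
  exact pv_main value
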